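-- pv_equiv track=rewrite | github.com/swansluk03/WatchDNA-Store-Locator-Captstone | Prototypes/Data_Scrappers/extraction_techniques.py | _looks_like_store
-- ===== SOURCE A (Python) =====
-- from typing import Dict, List, Any, Optional, Tuple
--
-- def _looks_like_store(obj: Dict) -> bool:
--     if not isinstance(obj, dict):
--         return False
--     keys_lower = [k.lower() for k in obj.keys()]
--     has_coords = any(k in ["lat", "latitude", "y"] for k in keys_lower) and any(
--         k in ["lng", "longitude", "x"] for k in keys_lower
--     )
--     has_name = any("name" in k or "title" in k for k in keys_lower)
--     has_city = any("city" in k for k in keys_lower)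
--     return (has_coords or has_name) and (has_name or has_city)
-- ===== SOURCE B (Python) =====
-- def _key_bits(kl):
--     bits = 0
--     if kl in ("lat", "latitude", "y"):
--         bits |= 1
--     if kl in ("lng", "longitude", "x"):
--         bits |= 2
--     if "name" in kl or "title" in kl:
--         bits |= 4
--     if "city" in kl:
--         bits |= 8
--     return bits
--
--
-- def _looks_like_store(obj) -> bool:
--     if not isinstance(obj, dict):
--         return False
--     mask = 0
--     for k in obj.keys():
--         mask |= _key_bits(k.lower())
--     # name/title alone suffices; otherwise need both coordinates and a city:
--     # (coords or name) and (name or city) == name or (lat and lng and city)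
--     return (mask & 4) != 0 or ((mask & 3) == 3 and (mask & 8) != 0)
-- ===== Notes on version B (the rewrite author's own statement) =====
-- stated objective: alternative
-- what changed: B classifies each key into a 4-bit integer mask, ORs the masks in one pass, and decides from the final bitmask via the simplified identity name or (lat and lng and city), instead of A's four any()-scans over a lowered-key list combined as (coords or name) and (name or city).
import Mathlib
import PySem

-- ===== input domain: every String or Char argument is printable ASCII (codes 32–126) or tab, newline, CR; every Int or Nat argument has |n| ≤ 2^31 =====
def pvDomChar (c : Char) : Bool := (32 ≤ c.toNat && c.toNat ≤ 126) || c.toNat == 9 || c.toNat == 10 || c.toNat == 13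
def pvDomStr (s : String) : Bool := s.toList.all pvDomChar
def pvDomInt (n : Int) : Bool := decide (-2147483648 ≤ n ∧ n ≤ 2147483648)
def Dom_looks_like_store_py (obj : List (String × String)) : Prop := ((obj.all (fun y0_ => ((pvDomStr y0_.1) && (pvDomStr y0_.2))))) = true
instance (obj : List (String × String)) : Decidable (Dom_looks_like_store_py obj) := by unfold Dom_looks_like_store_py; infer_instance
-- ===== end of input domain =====

-- B replaces A's four any()-scans and (coords∨name)∧(name∨city) combination by a single
-- OR-accumulated 4-bit integer mask per key and the equivalent test name∨(lat∧lng∧city)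
-- (alternative decomposition, same asymptotic cost).

-- ===== PORT A =====
def looks_like_store_py (obj : List (String × String)) : Bool :=
  let keys_lower := obj.map (fun kv => PySem.Str.lower kv.1)
  let has_coords := (keys_lower.any (fun k => ["lat", "latitude", "y"].contains k)) &&
    (keys_lower.any (fun k => ["lng", "longitude", "x"].contains k))
  let has_name := keys_lower.any (fun k => PySem.Str.isIn "name" k || PySem.Str.isIn "title" k)
  let has_city := keys_lower.any (fun k => PySem.Str.isIn "city" k)
  (has_coords || has_name) && (has_name || has_city)

-- ===== PORT B =====
def pvKeyBits (kl : String) : Nat :=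
  let bits : Nat := 0
  let bits := if ["lat", "latitude", "y"].contains kl then bits ||| 1 else bits
  let bits := if ["lng", "longitude", "x"].contains kl then bits ||| 2 else bits
  let bits := if PySem.Str.isIn "name" kl || PySem.Str.isIn "title" kl then bits ||| 4 else bits
  let bits := if PySem.Str.isIn "city" kl then bits ||| 8 else bits
  bits

def looks_like_store_py_alt (obj : List (String × String)) : Bool :=
  let mask := obj.foldl (fun (m : Nat) kv => m ||| pvKeyBits (PySem.Str.lower kv.1)) 0
  (mask &&& 4 != 0) || ((mask &&& 3 == 3) && (mask &&& 8 != 0))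

-- ===== PRECONDITION & SPEC =====
def Spec_looks_like_store_py (obj : List (String × String)) (out : Bool) : Prop := out = looks_like_store_py_alt obj
instance (obj : List (String × String)) (out : Bool) : Decidable (Spec_looks_like_store_py obj out) := by unfold Spec_looks_like_store_py; infer_instance

-- ===== CLAIM (what is proved, stated in full; the proofs are below) =====
def Claim_equal_looks_like_store_py : Prop := ∀ (obj : List (String × String)), Dom_looks_like_store_py obj → Spec_looks_like_store_py obj (looks_like_store_py obj)

-- ===== LEMMAS AND PROOFS =====

/-- Proof-side encoding of a four-bit mask from its four bits. -/
def pvEncode (a b c d : Bool) : Nat :=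
  (cond a 1 0) ||| (cond b 2 0) ||| (cond c 4 0) ||| (cond d 8 0)

theorem pvKeyBits_eq (kl : String) :
    pvKeyBits kl =
      pvEncode (["lat", "latitude", "y"].contains kl)
        (["lng", "longitude", "x"].contains kl)
        (PySem.Str.isIn "name" kl || PySem.Str.isIn "title" kl)
        (PySem.Str.isIn "city" kl) := by
  unfold pvKeyBits pvEncode
  rcases h1 : ["lat", "latitude", "y"].contains kl <;>
  rcases h2 : ["lng", "longitude", "x"].contains kl <;>
  rcases h3 : PySem.Str.isIn "name" kl || PySem.Str.isIn "title" kl <;>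
  rcases h4 : PySem.Str.isIn "city" kl <;>
  simp [h1, h2]

theorem pvEncode_or (a b c d a' b' c' d' : Bool) :
    pvEncode a b c d ||| pvEncode a' b' c' d' =
      pvEncode (a || a') (b || b') (c || c') (d || d') := by
  revert a b c d a' b' c' d'; decide

theorem pv_fold_encode (obj : List (String × String)) (a b c d : Bool) :
    obj.foldl (fun (m : Nat) kv => m ||| pvKeyBits (PySem.Str.lower kv.1)) (pvEncode a b c d) =
      pvEncode
        (a || (obj.map (fun kv => PySem.Str.lower kv.1)).any (fun k => ["lat", "latitude", "y"].contains k))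
        (b || (obj.map (fun kv => PySem.Str.lower kv.1)).any (fun k => ["lng", "longitude", "x"].contains k))
        (c || (obj.map (fun kv => PySem.Str.lower kv.1)).any (fun k => PySem.Str.isIn "name" k || PySem.Str.isIn "title" k))
        (d || (obj.map (fun kv => PySem.Str.lower kv.1)).any (fun k => PySem.Str.isIn "city" k)) := by
  induction obj generalizing a b c d with
  | nil => simp
  | cons hd tl ih =>
    rw [List.foldl_cons, pvKeyBits_eq, pvEncode_or, ih]
    simp [Bool.or_assoc]

theorem pv_test_encode (a b c d : Bool) :
    ((pvEncode a b c d &&& 4 != 0) || ((pvEncode a b c d &&& 3 == 3) && (pvEncode a b c d &&& 8 != 0)))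
      = (((a && b) || c) && (c || d)) := by
  revert a b c d; decide

theorem pv_fold_encode0 (obj : List (String × String)) :
    obj.foldl (fun (m : Nat) kv => m ||| pvKeyBits (PySem.Str.lower kv.1)) 0 =
      pvEncode
        ((obj.map (fun kv => PySem.Str.lower kv.1)).any (fun k => ["lat", "latitude", "y"].contains k))
        ((obj.map (fun kv => PySem.Str.lower kv.1)).any (fun k => ["lng", "longitude", "x"].contains k))
        ((obj.map (fun kv => PySem.Str.lower kv.1)).any (fun k => PySem.Str.isIn "name" k || PySem.Str.isIn "title" k))
        ((obj.map (fun kv => PySem.Str.lower kv.1)).any (fun k => PySem.Str.isIn "city" k)) := by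
  have h := pv_fold_encode obj false false false false
  simpa using h

-- ===== VERDICT (by name: the statement is the Claim_ definition above) =====
theorem looks_like_store_py_spec : Claim_equal_looks_like_store_py := by
  intro obj _
  unfold Spec_looks_like_store_py looks_like_store_py looks_like_store_py_alt
  simp only [pv_fold_encode0]
  rw [pv_test_encode]
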